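-- pv_equiv track=rewrite | github.com/anubhab001/baksheesh | reference-software/baksheesh_gift.py | _post_process_words
-- ===== SOURCE A (Python) =====
-- from typing import Iterable, List, Sequence
--
-- def _post_process_words(words: Sequence[int]) -> List[int]:
--     """Post-processing for encryption output."""
--     out: List[int] = []
--     for group in range(8):
--         src = words[7 - group]
--         word = 0
--         for sbox in range(4):
--             nib = (src >> (4 * sbox)) & 0xF
--             word |= nib << (4 * (3 - sbox))
--         out.append(word)
--     return out
-- ===== SOURCE B (Python) =====
-- from typing import List, Sequence
--
-- def _post_process_words(words: Sequence[int]) -> List[int]: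
--     """Reverse the whole flat sequence of 32 nibbles, then regroup into 8 words."""
--     nibs = [(words[i] // 16 ** (3 - j)) % 16 for i in range(8) for j in range(4)]
--     rev = nibs[::-1]
--     return [((rev[4 * k] * 16 + rev[4 * k + 1]) * 16 + rev[4 * k + 2]) * 16 + rev[4 * k + 3]
--             for k in range(8)]
-- ===== Notes on version B (the rewrite author's own statement) =====
-- stated objective: simpler
-- what changed: Instead of A's nested loops that per output word pick words[7-group] and re-place each of its 4 nibbles at the mirrored position, B flattens the first 8 words into one 32-nibble list, reverses that whole list once, and regroups consecutive 4-nibble chunks into the 8 output words.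
import Mathlib
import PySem

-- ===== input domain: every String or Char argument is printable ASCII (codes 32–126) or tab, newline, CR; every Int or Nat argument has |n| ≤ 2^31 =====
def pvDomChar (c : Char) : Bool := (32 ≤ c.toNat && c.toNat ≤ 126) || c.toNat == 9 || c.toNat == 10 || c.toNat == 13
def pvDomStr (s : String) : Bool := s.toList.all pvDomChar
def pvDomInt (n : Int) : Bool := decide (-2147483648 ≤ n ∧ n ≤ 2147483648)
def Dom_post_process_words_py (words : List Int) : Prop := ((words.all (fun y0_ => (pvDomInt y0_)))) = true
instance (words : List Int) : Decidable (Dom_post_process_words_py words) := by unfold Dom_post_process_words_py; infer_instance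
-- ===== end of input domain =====

-- B reverses the whole flat 32-nibble sequence at once instead of A's per-word mirroring.
-- Equivalence is about the return value; neither program mutates its argument.

-- ===== PORT A =====
-- 'nib = (src >> (4*sbox)) & 0xF' is ported as mod (floordiv src 2^(4*sbox)) 16:
-- Python's arithmetic right shift is floor division by 2^k and '& 0xF' is 'mod 16'
-- for every int (also negative).  'word |= nib << (4*(3-sbox))' is ported as
-- 'word + nib * 2^(4*(3-sbox))': the four nibble positions are disjoint and the
-- nibbles are in [0,16), so the bitwise OR is exactly this addition.
def post_process_words_py (words : List Int) : List Int :=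
  (List.range 8).foldl (fun out group =>
    let src := PySem.List.pyGetD words ((7 : Int) - (group : Int)) 0
    let word := (List.range 4).foldl (fun word sbox =>
      let nib := PySem.Int.mod (PySem.Int.floordiv src (2 ^ (4 * sbox))) 16
      word + nib * 2 ^ (4 * (3 - sbox))) 0
    out ++ [word]) []

-- ===== PORT B =====
def post_process_words_py_alt (words : List Int) : List Int :=
  let nibs := (List.range 8).flatMap (fun i => (List.range 4).map (fun j =>
    PySem.Int.mod (PySem.Int.floordiv (PySem.List.pyGetD words (i : Int) 0) (16 ^ (3 - j))) 16))
  let rev := nibs.reverse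
  (List.range 8).map (fun k =>
    ((PySem.List.pyGetD rev ((4 * k : Nat) : Int) 0 * 16
      + PySem.List.pyGetD rev ((4 * k + 1 : Nat) : Int) 0) * 16
      + PySem.List.pyGetD rev ((4 * k + 2 : Nat) : Int) 0) * 16
      + PySem.List.pyGetD rev ((4 * k + 3 : Nat) : Int) 0)

-- ===== PRECONDITION & SPEC =====
-- Both programs raise IndexError when fewer than 8 words are given; Pre_ excludes exactly that.
def Pre_post_process_words_py (words : List Int) : Prop := 8 ≤ words.length
instance (words : List Int) : Decidable (Pre_post_process_words_py words) := by
  unfold Pre_post_process_words_py; infer_instance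
def pvWitness_post_process_words_py : List Int := [0, 1, 2, 3, 4, 5, 6, 7]

def Spec_post_process_words_py (words : List Int) (out : List Int) : Prop :=
  out = post_process_words_py_alt words
instance (words : List Int) (out : List Int) : Decidable (Spec_post_process_words_py words out) := by
  unfold Spec_post_process_words_py; infer_instance

-- ===== CLAIM (what is proved, stated in full; the proofs are below) =====
def Claim_equal_post_process_words_py : Prop := ∀ (words : List Int),
  Dom_post_process_words_py words → Pre_post_process_words_py words →
  Spec_post_process_words_py words (post_process_words_py words)

-- ===== LEMMAS AND PROOFS =====

-- ===== VERDICT (by name: the statement is the Claim_ definition above) =====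
theorem post_process_words_py_spec : Claim_equal_post_process_words_py := by
  intro words _ hpre
  unfold Pre_post_process_words_py at hpre
  obtain ⟨a, b, c, d, e, f, g, h, t, rfl⟩ :
      ∃ a b c d e f g h t, words = a :: b :: c :: d :: e :: f :: g :: h :: t := by
    match words, hpre with
    | a :: b :: c :: d :: e :: f :: g :: h :: t, _ => exact ⟨a, b, c, d, e, f, g, h, t, rfl⟩
  unfold Spec_post_process_words_py post_process_words_py post_process_words_py_alt
  simp [List.range_succ, PySem.List.pyGetD]
  and_intros <;> ring
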